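-- pv_equiv track=rewrite | github.com/Robert-Davie/advent-of-code-2024 | solutions/day5.py | check_rule_broken
-- ===== SOURCE A (Python) =====
-- def check_rule_broken(list_in, rule):
--     if (rule[0] not in list_in) or (rule[1] not in list_in):
--         return False
--     for value in list_in:
--         if value == rule[1]:
--             return True
--         elif value == rule[0]:
--             return False
-- ===== SOURCE B (Python) =====
-- def check_rule_broken(list_in, rule):
--     if (rule[0] not in list_in) or (rule[1] not in list_in):
--         return False
--     return list_in.index(rule[1]) <= list_in.index(rule[0])
-- ===== Notes on version B (the rewrite author's own statement) =====
-- stated objective: simpler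
-- what changed: A's single early-exit scan over list_in is replaced by comparing the two first-occurrence positions (list_in.index of rule[1] vs rule[0]); the loop with its branch ordering disappears.
import Mathlib
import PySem

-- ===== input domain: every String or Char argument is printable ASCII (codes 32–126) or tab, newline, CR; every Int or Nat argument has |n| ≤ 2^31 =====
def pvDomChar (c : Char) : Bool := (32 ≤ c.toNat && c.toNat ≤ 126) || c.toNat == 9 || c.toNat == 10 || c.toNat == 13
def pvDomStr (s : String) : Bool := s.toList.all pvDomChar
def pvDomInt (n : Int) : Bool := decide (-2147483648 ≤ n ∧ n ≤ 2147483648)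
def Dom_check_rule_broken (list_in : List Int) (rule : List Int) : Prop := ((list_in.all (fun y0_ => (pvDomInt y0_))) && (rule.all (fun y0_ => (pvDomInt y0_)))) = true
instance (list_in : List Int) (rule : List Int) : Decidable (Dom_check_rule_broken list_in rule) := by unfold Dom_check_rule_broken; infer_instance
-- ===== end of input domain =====

-- B replaces A's early-exit scan by a comparison of the two first-occurrence indices (simpler decomposition, same cost).


-- ===== PORT A =====
-- the for-loop: first hit of r1 → True, first hit of r0 → False (Python's fall-through None is unreachable under the guard, ported as false)
def checkRuleLoop (r0 r1 : Int) : List Int → Bool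
  | [] => false
  | v :: rest => if v = r1 then true else if v = r0 then false else checkRuleLoop r0 r1 rest

def check_rule_broken (list_in : List Int) (rule : List Int) : Bool :=
  let r0 := (PySem.List.pyGet? rule 0).getD 0
  if ¬ list_in.contains r0 then false
  else
    let r1 := (PySem.List.pyGet? rule 1).getD 0
    if ¬ list_in.contains r1 then false
    else checkRuleLoop r0 r1 list_in

-- ===== PORT B =====
def check_rule_broken_alt (list_in : List Int) (rule : List Int) : Bool :=
  let r0 := (PySem.List.pyGet? rule 0).getD 0
  if ¬ list_in.contains r0 then false
  else
    let r1 := (PySem.List.pyGet? rule 1).getD 0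
    if ¬ list_in.contains r1 then false
    else
      match PySem.List.index? list_in r1, PySem.List.index? list_in r0 with
      | some i, some j => i ≤ j
      | _, _ => false

-- ===== PRECONDITION & SPEC =====
-- Pre_ excludes exactly the inputs where A raises IndexError: rule empty, or rule of length 1 whose single element occurs in list_in.
def Pre_check_rule_broken (list_in : List Int) (rule : List Int) : Prop :=
  rule ≠ [] ∧ ((PySem.List.pyGet? rule 0).getD 0 ∈ list_in → 2 ≤ rule.length)
instance (list_in : List Int) (rule : List Int) : Decidable (Pre_check_rule_broken list_in rule) := by unfold Pre_check_rule_broken; infer_instance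
def pvWitness_check_rule_broken : List Int × List Int := ([1, 2, 3], [3, 1])

def Spec_check_rule_broken (list_in : List Int) (rule : List Int) (out : Bool) : Prop := out = check_rule_broken_alt list_in rule
instance (list_in : List Int) (rule : List Int) (out : Bool) : Decidable (Spec_check_rule_broken list_in rule out) := by unfold Spec_check_rule_broken; infer_instance

-- ===== CLAIM (what is proved, stated in full; the proofs are below) =====
def Claim_equal_check_rule_broken : Prop := ∀ (list_in : List Int) (rule : List Int), Dom_check_rule_broken list_in rule → Pre_check_rule_broken list_in rule → Spec_check_rule_broken list_in rule (check_rule_broken list_in rule)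

-- ===== LEMMAS AND PROOFS =====
-- A's scan equals the index comparison whenever both values occur in the list.
theorem checkRuleLoop_eq_index (r0 r1 : Int) (l : List Int) (h0 : r0 ∈ l) (h1 : r1 ∈ l) :
    checkRuleLoop r0 r1 l =
      (match PySem.List.index? l r1, PySem.List.index? l r0 with
       | some i, some j => decide (i ≤ j)
       | _, _ => false) := by
  induction l with
  | nil => cases h0
  | cons x xs ih =>
    by_cases hx1 : x = r1
    · subst hx1
      rw [PySem.List.index?_cons_self]
      cases hj : PySem.List.index? (x :: xs) r0 with
      | none => exact absurd h0 ((PySem.List.index?_eq_none_iff _ _).mp hj)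
      | some j => simp [checkRuleLoop]
    · by_cases hx0 : x = r0
      · subst hx0
        have h1' : r1 ∈ xs := by
          rcases List.mem_cons.mp h1 with h | h
          · exact absurd h.symm hx1
          · exact h
        rw [PySem.List.index?_cons_self, PySem.List.index?_cons_of_ne _ hx1]
        cases hi : PySem.List.index? xs r1 with
        | none => exact absurd h1' ((PySem.List.index?_eq_none_iff _ _).mp hi)
        | some i => simp [checkRuleLoop, hx1]
      · have h0' : r0 ∈ xs := by
          rcases List.mem_cons.mp h0 with h | h
          · exact absurd h.symm hx0
          · exact h
        have h1' : r1 ∈ xs := by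
          rcases List.mem_cons.mp h1 with h | h
          · exact absurd h.symm hx1
          · exact h
        rw [PySem.List.index?_cons_of_ne _ hx1, PySem.List.index?_cons_of_ne _ hx0]
        have hrec := ih h0' h1'
        cases hi : PySem.List.index? xs r1 with
        | none => exact absurd h1' ((PySem.List.index?_eq_none_iff _ _).mp hi)
        | some i =>
          cases hj : PySem.List.index? xs r0 with
          | none => exact absurd h0' ((PySem.List.index?_eq_none_iff _ _).mp hj)
          | some j =>
            rw [hi, hj] at hrec
            simp [checkRuleLoop, hx1, hx0, hrec]

-- ===== VERDICT (by name: the statement is the Claim_ definition above) =====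
theorem check_rule_broken_spec : Claim_equal_check_rule_broken := by
  intro list_in rule _ _
  unfold Spec_check_rule_broken check_rule_broken check_rule_broken_alt
  set r0 := (PySem.List.pyGet? rule 0).getD 0 with hr0
  set r1 := (PySem.List.pyGet? rule 1).getD 0 with hr1
  by_cases h0 : r0 ∈ list_in
  · by_cases h1 : r1 ∈ list_in
    · rw [if_neg (by simp [h0]), if_neg (by simp [h1]), if_neg (by simp [h0]), if_neg (by simp [h1]),
          checkRuleLoop_eq_index r0 r1 list_in h0 h1]
    · simp [h1]
  · simp [h0]
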